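-- pv_equiv track=rewrite | github.com/mortyc126-debug/SHA | parallel_experiments.py | get_carry_profile
-- ===== SOURCE A (Python) =====
-- M32 = 0xFFFFFFFF
--
-- def ror(x, n, bits=32):
--     return ((x >> n) | (x << (bits - n))) & ((1 << bits) - 1)
--
-- K = [
--     0x428a2f98, 0x71374491, 0xb5c0fbcf, 0xe9b5dba5, 0x3956c25b, 0x59f111f1, 0x923f82a4, 0xab1c5ed5,
--     0xd807aa98, 0x12835b01, 0x243185be, 0x550c7dc3, 0x72be5d74, 0x80deb1fe, 0x9bdc06a7, 0xc19bf174,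
--     0xe49b69c1, 0xefbe4786, 0xfc19dc68, 0x240ca1cc, 0x2de92c6f, 0x4a7484aa, 0x5cb0a9dc, 0x76f988da,
--     0x983e5152, 0xa831c66d, 0xb00327c8, 0xbf597fc7, 0xc6e00bf3, 0xd5a79147, 0x06ca6351, 0x14292967,
--     0x27b70a85, 0x2e1b2138, 0x4d2c6dfc, 0x53380d13, 0x650a7354, 0x766a0abb, 0x81c2c92e, 0x92722c85,
--     0xa2bfe8a1, 0xa81a664b, 0xc24b8b70, 0xc76c51a3, 0xd192e819, 0xd6990624, 0xf40e3585, 0x106aa070,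
--     0x19a4c116, 0x1e376c08, 0x2748774c, 0x34b0bcb5, 0x391c0cb3, 0x4ed8aa4a, 0x5b9cca4f, 0x682e6ff3,
--     0x748f82ee, 0x78a5636f, 0x84c87814, 0x8cc70208, 0x90befffa, 0xa4506ceb, 0xbef9a3f7, 0xc67178f2
-- ]
--
-- IV = [0x6a09e667, 0xbb67ae85, 0x3c6ef372, 0xa54ff53a,
--       0x510e527f, 0x9b05688c, 0x1f83d9ab, 0x5be0cd19]
--
-- def get_carry_profile(W, R=64):
--     """Get carry overflow bits for each round"""
--     w = list(W)
--     for i in range(16, max(R, 16)):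
--         s0 = (ror(w[i-15], 7) ^ ror(w[i-15], 18) ^ (w[i-15] >> 3)) & M32
--         s1 = (ror(w[i-2], 17) ^ ror(w[i-2], 19) ^ (w[i-2] >> 10)) & M32
--         w.append((w[i-16] + s0 + w[i-7] + s1) & M32)
--
--     a,b,c,d,e,f,g,h = IV
--     carries = []
--     for i in range(min(R, 64)):
--         S1 = (ror(e,6)^ror(e,11)^(e>>25))&M32
--         ch = ((e&f)^(~e&g))&M32
--         raw = h + S1 + ch + K[i] + w[i]
--         carries.append(1 if raw >= (1 << 32) else 0)
--         t1 = raw & M32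
--         S0 = (ror(a,2)^ror(a,13)^ror(a,22))&M32
--         maj = ((a&b)^(a&c)^(b&c))&M32
--         t2 = (S0+maj)&M32
--         h=g;g=f;f=e;e=(d+t1)&M32;d=c;c=b;b=a;a=(t1+t2)&M32
--     return carries
-- ===== SOURCE B (Python) =====
-- M32 = 0xFFFFFFFF
--
-- def ror(x, n, bits=32):
--     return ((x >> n) | (x << (bits - n))) & ((1 << bits) - 1)
--
-- K = [
--     0x428a2f98, 0x71374491, 0xb5c0fbcf, 0xe9b5dba5, 0x3956c25b, 0x59f111f1, 0x923f82a4, 0xab1c5ed5,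
--     0xd807aa98, 0x12835b01, 0x243185be, 0x550c7dc3, 0x72be5d74, 0x80deb1fe, 0x9bdc06a7, 0xc19bf174,
--     0xe49b69c1, 0xefbe4786, 0xfc19dc68, 0x240ca1cc, 0x2de92c6f, 0x4a7484aa, 0x5cb0a9dc, 0x76f988da,
--     0x983e5152, 0xa831c66d, 0xb00327c8, 0xbf597fc7, 0xc6e00bf3, 0xd5a79147, 0x06ca6351, 0x14292967,
--     0x27b70a85, 0x2e1b2138, 0x4d2c6dfc, 0x53380d13, 0x650a7354, 0x766a0abb, 0x81c2c92e, 0x92722c85,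
--     0xa2bfe8a1, 0xa81a664b, 0xc24b8b70, 0xc76c51a3, 0xd192e819, 0xd6990624, 0xf40e3585, 0x106aa070,
--     0x19a4c116, 0x1e376c08, 0x2748774c, 0x34b0bcb5, 0x391c0cb3, 0x4ed8aa4a, 0x5b9cca4f, 0x682e6ff3,
--     0x748f82ee, 0x78a5636f, 0x84c87814, 0x8cc70208, 0x90befffa, 0xa4506ceb, 0xbef9a3f7, 0xc67178f2
-- ]
--
-- IV = [0x6a09e667, 0xbb67ae85, 0x3c6ef372, 0xa54ff53a,
--       0x510e527f, 0x9b05688c, 0x1f83d9ab, 0x5be0cd19]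
--
-- def get_carry_profile(W, R=64):
--     """Single-track reformulation: only the a-sequence of the SHA-256 round
--     recurrence is stored (seeded with IV d,c,b,a); the e-side state is never
--     kept, each needed e-value is reconstructed from the a-sequence via the
--     algebraic identity e_i = (a_i - t2_i + a_{i-4}) mod 2**32, and the
--     schedule is extended only as far as the rounds actually read it."""
--     rounds = min(R, 64)
--     w = list(W)
--     for j in range(rounds - len(w)):
--         s0 = (ror(w[j+1], 7) ^ ror(w[j+1], 18) ^ (w[j+1] >> 3)) & M32
--         s1 = (ror(w[j+14], 17) ^ ror(w[j+14], 19) ^ (w[j+14] >> 10)) & M32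
--         w.append((w[j] + s0 + w[j+9] + s1) & M32)
--
--     a = [IV[3], IV[2], IV[1], IV[0]]   # a[i+4] holds a(i), i = -4..-1 seeded
--
--     def t2(i):
--         x, y, z = a[i+3], a[i+2], a[i+1]
--         s0 = (ror(x, 2) ^ ror(x, 13) ^ ror(x, 22)) & M32
--         maj = ((x & y) ^ (x & z) ^ (y & z)) & M32
--         return (s0 + maj) & M32
--
--     def e(i):
--         if i < 0:
--             return IV[3 - i]
--         return (a[i+4] - t2(i) + a[i]) % (1 << 32)
--
--     carries = []
--     for i in range(rounds):
--         ei = e(i-1)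
--         S1 = (ror(ei, 6) ^ ror(ei, 11) ^ (ei >> 25)) & M32
--         ch = ((ei & e(i-2)) ^ (~ei & e(i-3))) & M32
--         raw = e(i-4) + S1 + ch + K[i] + w[i]
--         carries.append(1 if raw >= (1 << 32) else 0)
--         a.append(((raw & M32) + t2(i)) & M32)
--     return carries
-- ===== Notes on version B (the rewrite author's own statement) =====
-- stated objective: alternative
-- what changed: B drops the e/f/g/h half of the SHA-256 state entirely: it stores only the a-sequence (seeded from IV d,c,b,a) and reconstructs every needed e-value on demand through the algebraic identity e_i = (a_i - t2_i + a_{i-4}) mod 2^32, instead of A's rotating 8-variable shift register; and the message schedule is extended only as far as the min(R,64) rounds actually read it, instead of A's unconditional range(16, max(R,16)) pre-pass that keeps expanding the schedule for R beyond 64.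
import Mathlib
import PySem

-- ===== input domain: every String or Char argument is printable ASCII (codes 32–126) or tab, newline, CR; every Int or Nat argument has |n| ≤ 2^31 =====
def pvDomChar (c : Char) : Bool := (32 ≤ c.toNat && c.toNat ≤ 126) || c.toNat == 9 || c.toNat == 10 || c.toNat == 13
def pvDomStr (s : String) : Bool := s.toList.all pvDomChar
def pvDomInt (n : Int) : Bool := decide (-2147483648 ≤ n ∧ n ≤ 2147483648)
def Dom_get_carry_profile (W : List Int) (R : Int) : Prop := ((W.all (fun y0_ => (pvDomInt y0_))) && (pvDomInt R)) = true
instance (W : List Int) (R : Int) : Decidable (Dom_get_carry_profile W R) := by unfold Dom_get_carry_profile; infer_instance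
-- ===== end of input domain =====

-- B keeps only the a-sequence of the SHA-256 round state, reconstructs the e-side
-- values via e_i = (a_i - t2_i + a_{i-4}) mod 2^32, and extends the message
-- schedule only as far as the min(R,64) rounds read it (A pre-extends it to
-- max(R,16) unconditionally); objective: alternative algorithm.

-- ===== PORT A =====
-- shared module-level constants/helpers of Source A (used by both Pythons)
def pvM32 : Int := 0xFFFFFFFF

def pvRor (x : Int) (n : Nat) : Int :=
  PySem.Int.band (PySem.Int.bor (x >>> n) (x <<< (32 - n))) ((1 <<< 32) - 1)

def pvK : List Int := [
  0x428a2f98, 0x71374491, 0xb5c0fbcf, 0xe9b5dba5, 0x3956c25b, 0x59f111f1, 0x923f82a4, 0xab1c5ed5,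
  0xd807aa98, 0x12835b01, 0x243185be, 0x550c7dc3, 0x72be5d74, 0x80deb1fe, 0x9bdc06a7, 0xc19bf174,
  0xe49b69c1, 0xefbe4786, 0xfc19dc68, 0x240ca1cc, 0x2de92c6f, 0x4a7484aa, 0x5cb0a9dc, 0x76f988da,
  0x983e5152, 0xa831c66d, 0xb00327c8, 0xbf597fc7, 0xc6e00bf3, 0xd5a79147, 0x06ca6351, 0x14292967,
  0x27b70a85, 0x2e1b2138, 0x4d2c6dfc, 0x53380d13, 0x650a7354, 0x766a0abb, 0x81c2c92e, 0x92722c85,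
  0xa2bfe8a1, 0xa81a664b, 0xc24b8b70, 0xc76c51a3, 0xd192e819, 0xd6990624, 0xf40e3585, 0x106aa070,
  0x19a4c116, 0x1e376c08, 0x2748774c, 0x34b0bcb5, 0x391c0cb3, 0x4ed8aa4a, 0x5b9cca4f, 0x682e6ff3,
  0x748f82ee, 0x78a5636f, 0x84c87814, 0x8cc70208, 0x90befffa, 0xa4506ceb, 0xbef9a3f7, 0xc67178f2]

def pvIV : List Int := [0x6a09e667, 0xbb67ae85, 0x3c6ef372, 0xa54ff53a,
                        0x510e527f, 0x9b05688c, 0x1f83d9ab, 0x5be0cd19]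

-- body of A's schedule loop (counter i runs from 16)
def pvSchedA (w : List Int) (i : Int) : List Int :=
  let s0 := PySem.Int.band (PySem.Int.bxor (PySem.Int.bxor (pvRor (PySem.List.pyGetD w (i-15) 0) 7)
              (pvRor (PySem.List.pyGetD w (i-15) 0) 18)) (PySem.List.pyGetD w (i-15) 0 >>> 3)) pvM32
  let s1 := PySem.Int.band (PySem.Int.bxor (PySem.Int.bxor (pvRor (PySem.List.pyGetD w (i-2) 0) 17)
              (pvRor (PySem.List.pyGetD w (i-2) 0) 19)) (PySem.List.pyGetD w (i-2) 0 >>> 10)) pvM32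
  w ++ [PySem.Int.band (PySem.List.pyGetD w (i-16) 0 + s0 + PySem.List.pyGetD w (i-7) 0 + s1) pvM32]

-- body of A's round loop: state = ((a,b,c,d,e,f,g,h), carries)
def pvRoundA (w : List Int)
    (st : (Int × Int × Int × Int × Int × Int × Int × Int) × List Int) (i : Int) :
    (Int × Int × Int × Int × Int × Int × Int × Int) × List Int :=
  match st with
  | ((a, b, c, d, e, f, g, h), cs) =>
    let S1 := PySem.Int.band (PySem.Int.bxor (PySem.Int.bxor (pvRor e 6) (pvRor e 11)) (e >>> 25)) pvM32
    let ch := PySem.Int.band (PySem.Int.bxor (PySem.Int.band e f) (PySem.Int.band (Int.not e) g)) pvM32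
    let raw := h + S1 + ch + PySem.List.pyGetD pvK i 0 + PySem.List.pyGetD w i 0
    let cs' := cs ++ [if ((1:Int) <<< 32) ≤ raw then (1:Int) else 0]
    let t1 := PySem.Int.band raw pvM32
    let S0 := PySem.Int.band (PySem.Int.bxor (PySem.Int.bxor (pvRor a 2) (pvRor a 13)) (pvRor a 22)) pvM32
    let maj := PySem.Int.band (PySem.Int.bxor (PySem.Int.bxor (PySem.Int.band a b) (PySem.Int.band a c))
                 (PySem.Int.band b c)) pvM32
    let t2 := PySem.Int.band (S0 + maj) pvM32
    ((PySem.Int.band (t1 + t2) pvM32, a, b, c, PySem.Int.band (d + t1) pvM32, e, f, g), cs')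

def get_carry_profile (W : List Int) (R : Int) : List Int :=
  let w := (PySem.List.pyRange 16 (max R 16) 1).foldl pvSchedA W
  -- a,b,c,d,e,f,g,h = IV
  let st0 : (Int × Int × Int × Int × Int × Int × Int × Int) × List Int :=
    ((0x6a09e667, 0xbb67ae85, 0x3c6ef372, 0xa54ff53a, 0x510e527f, 0x9b05688c, 0x1f83d9ab, 0x5be0cd19), [])
  ((PySem.List.pyRange 0 (min R 64) 1).foldl (pvRoundA w) st0).2

-- ===== PORT B =====
-- body of B's schedule loop (counter j runs from 0)
def pvSchedB (w : List Int) (j : Int) : List Int :=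
  let s0 := PySem.Int.band (PySem.Int.bxor (PySem.Int.bxor (pvRor (PySem.List.pyGetD w (j+1) 0) 7)
              (pvRor (PySem.List.pyGetD w (j+1) 0) 18)) (PySem.List.pyGetD w (j+1) 0 >>> 3)) pvM32
  let s1 := PySem.Int.band (PySem.Int.bxor (PySem.Int.bxor (pvRor (PySem.List.pyGetD w (j+14) 0) 17)
              (pvRor (PySem.List.pyGetD w (j+14) 0) 19)) (PySem.List.pyGetD w (j+14) 0 >>> 10)) pvM32
  w ++ [PySem.Int.band (PySem.List.pyGetD w j 0 + s0 + PySem.List.pyGetD w (j+9) 0 + s1) pvM32]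

-- Source B's nested helper t2(i): the t2 value of round i read off the a-list
def pvT2B (a : List Int) (i : Int) : Int :=
  let x := PySem.List.pyGetD a (i+3) 0
  let y := PySem.List.pyGetD a (i+2) 0
  let z := PySem.List.pyGetD a (i+1) 0
  let s0 := PySem.Int.band (PySem.Int.bxor (PySem.Int.bxor (pvRor x 2) (pvRor x 13)) (pvRor x 22)) pvM32
  let maj := PySem.Int.band (PySem.Int.bxor (PySem.Int.bxor (PySem.Int.band x y) (PySem.Int.band x z))
               (PySem.Int.band y z)) pvM32
  PySem.Int.band (s0 + maj) pvM32

-- Source B's nested helper e(i): e-value reconstructed from the a-list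
def pvEB (a : List Int) (i : Int) : Int :=
  if i < 0 then PySem.List.pyGetD pvIV (3 - i) 0
  else PySem.Int.mod (PySem.List.pyGetD a (i+4) 0 - pvT2B a i + PySem.List.pyGetD a i 0) ((1:Int) <<< 32)

-- body of B's round loop: state = (a-history, carries)
def pvRoundB (w : List Int) (st : List Int × List Int) (i : Int) : List Int × List Int :=
  match st with
  | (a, cs) =>
    let ei := pvEB a (i-1)
    let S1 := PySem.Int.band (PySem.Int.bxor (PySem.Int.bxor (pvRor ei 6) (pvRor ei 11)) (ei >>> 25)) pvM32
    let ch := PySem.Int.band (PySem.Int.bxor (PySem.Int.band ei (pvEB a (i-2)))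
                (PySem.Int.band (Int.not ei) (pvEB a (i-3)))) pvM32
    let raw := pvEB a (i-4) + S1 + ch + PySem.List.pyGetD pvK i 0 + PySem.List.pyGetD w i 0
    let cs' := cs ++ [if ((1:Int) <<< 32) ≤ raw then (1:Int) else 0]
    (a ++ [PySem.Int.band (PySem.Int.band raw pvM32 + pvT2B a i) pvM32], cs')

def get_carry_profile_alt (W : List Int) (R : Int) : List Int :=
  let rounds := min R 64
  let w := (PySem.List.pyRange 0 (rounds - PySem.List.len W) 1).foldl pvSchedB W
  let st0 : List Int × List Int :=
    ([PySem.List.pyGetD pvIV 3 0, PySem.List.pyGetD pvIV 2 0, PySem.List.pyGetD pvIV 1 0, PySem.List.pyGetD pvIV 0 0],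
     [])
  ((PySem.List.pyRange 0 rounds 1).foldl (pvRoundB w) st0).2

-- ===== PRECONDITION & SPEC =====
-- Pre_ is exactly the set of inputs on which A returns (elsewhere A raises
-- IndexError in one of its two loops: reading w[i-2] needs len(W) ≥ 15 once
-- R > 16, and reading w[i] in the round loop needs min(R,64) ≤ len(w)).
def Pre_get_carry_profile (W : List Int) (R : Int) : Prop :=
  (R ≤ 16 ∨ 15 ≤ (W.length : Int)) ∧ min R 64 ≤ (W.length : Int) + max R 16 - 16
instance (W : List Int) (R : Int) : Decidable (Pre_get_carry_profile W R) := by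
  unfold Pre_get_carry_profile; infer_instance

def pvWitness_get_carry_profile : List Int × Int :=
  ([0, 1, 2, 3, 4, 5, 6, 7, 8, 9, 10, 11, 12, 13, 14, 15], 64)

def Spec_get_carry_profile (W : List Int) (R : Int) (out : List Int) : Prop := out = get_carry_profile_alt W R
instance (W : List Int) (R : Int) (out : List Int) : Decidable (Spec_get_carry_profile W R out) := by unfold Spec_get_carry_profile; infer_instance

-- ===== CLAIM (what is proved, stated in full; the proofs are below) =====
def Claim_equal_get_carry_profile : Prop := ∀ (W : List Int) (R : Int), Dom_get_carry_profile W R → Pre_get_carry_profile W R → Spec_get_carry_profile W R (get_carry_profile W R)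

-- ===== LEMMAS AND PROOFS =====

-- common Nat-counted form of the schedule extension: m append steps, j = 0,1,…
def pvExt (w : List Int) (m : Nat) : List Int :=
  (List.range m).foldl (fun w (k : Nat) => pvSchedB w (k : Int)) w

lemma pvSchedA_shift (w : List Int) (k : Nat) : pvSchedA w (16 + (k : Int)) = pvSchedB w (k : Int) := by
  simp only [pvSchedA, pvSchedB]
  have h1 : (16 : Int) + k - 15 = (k : Int) + 1 := by ring
  have h2 : (16 : Int) + k - 2 = (k : Int) + 14 := by ring
  have h3 : (16 : Int) + k - 16 = (k : Int) := by ring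
  have h4 : (16 : Int) + k - 7 = (k : Int) + 9 := by ring
  rw [h1, h2, h3, h4]

lemma schedA_eq_pvExt (W : List Int) (R : Int) :
    (PySem.List.pyRange 16 (max R 16) 1).foldl pvSchedA W = pvExt W (max R 16 - 16).toNat := by
  rw [PySem.List.pyRange_one, List.foldl_map, pvExt]
  apply PySem.List.foldl_congr_mem
  intro acc k _
  exact pvSchedA_shift acc k

lemma schedB_eq_pvExt (W : List Int) (rounds : Int) :
    (PySem.List.pyRange 0 (rounds - PySem.List.len W) 1).foldl pvSchedB W
      = pvExt W (rounds - (W.length : Int)).toNat := by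
  rw [PySem.List.pyRange_one, List.foldl_map, PySem.List.len_eq, pvExt]
  simp only [Int.sub_zero]
  apply PySem.List.foldl_congr_mem
  intro acc k _
  norm_num

lemma pvExt_succ (w : List Int) (m : Nat) :
    pvExt w (m + 1) = pvSchedB (pvExt w m) (m : Int) := by
  simp [pvExt, List.range_succ]

lemma pvExt_length (w : List Int) (m : Nat) : (pvExt w m).length = w.length + m := by
  induction m with
  | zero => simp [pvExt]
  | succ m ih => rw [pvExt_succ, pvSchedB]; simp [ih]; omega

lemma pvExt_prefix (w : List Int) (m m' : Nat) (h : m ≤ m') : pvExt w m <+: pvExt w m' := by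
  induction m' with
  | zero => simp_all
  | succ m' ih =>
    rcases Nat.lt_or_ge m (m' + 1) with hlt | hge
    · refine (ih (by omega)).trans ?_
      rw [pvExt_succ, pvSchedB]
      exact List.prefix_append _ _
    · have : m = m' + 1 := by omega
      simp [this]

lemma pvGetD_of_prefix {xs ys : List Int} (h : xs <+: ys) (i : Int) (h0 : 0 ≤ i)
    (hlt : i < (xs.length : Int)) :
    PySem.List.pyGetD ys i 0 = PySem.List.pyGetD xs i 0 := by
  have hyl : i < (ys.length : Int) := lt_of_lt_of_le hlt (by exact_mod_cast h.length_le)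
  rw [PySem.List.pyGetD_eq_getElem (xs := ys) (i := i) (d := (0:Int)) h0 hyl,
      PySem.List.pyGetD_eq_getElem (xs := xs) (i := i) (d := (0:Int)) h0 hlt]
  exact (h.getElem (i := i.toNat) (by omega)).symm

-- proof-side names for the values one round computes (shared subterms of both step bodies)
def pvS1v (e : Int) : Int := PySem.Int.band (PySem.Int.bxor (PySem.Int.bxor (pvRor e 6) (pvRor e 11)) (e >>> 25)) pvM32
def pvChv (e f g : Int) : Int := PySem.Int.band (PySem.Int.bxor (PySem.Int.band e f) (PySem.Int.band (Int.not e) g)) pvM32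
def pvRawv (kv wv e f g h : Int) : Int := h + pvS1v e + pvChv e f g + kv + wv
def pvCarryv (kv wv e f g h : Int) : Int := if ((1:Int) <<< 32) ≤ pvRawv kv wv e f g h then (1:Int) else 0
def pvT1v (kv wv e f g h : Int) : Int := PySem.Int.band (pvRawv kv wv e f g h) pvM32
def pvS0v (a : Int) : Int := PySem.Int.band (PySem.Int.bxor (PySem.Int.bxor (pvRor a 2) (pvRor a 13)) (pvRor a 22)) pvM32
def pvMajv (a b c : Int) : Int := PySem.Int.band (PySem.Int.bxor (PySem.Int.bxor (PySem.Int.band a b) (PySem.Int.band a c)) (PySem.Int.band b c)) pvM32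
def pvT2v (a b c : Int) : Int := PySem.Int.band (pvS0v a + pvMajv a b c) pvM32
def pvNewAv (kv wv a b c e f g h : Int) : Int := PySem.Int.band (pvT1v kv wv e f g h + pvT2v a b c) pvM32
def pvNewEv (kv wv d e f g h : Int) : Int := PySem.Int.band (d + pvT1v kv wv e f g h) pvM32

lemma roundA_eq (w : List Int) (i a b c d e f g h : Int) (cs : List Int) :
    pvRoundA w ((a, b, c, d, e, f, g, h), cs) i =
      ((pvNewAv (PySem.List.pyGetD pvK i 0) (PySem.List.pyGetD w i 0) a b c e f g h, a, b, c,
        pvNewEv (PySem.List.pyGetD pvK i 0) (PySem.List.pyGetD w i 0) d e f g h, e, f, g),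
       cs ++ [pvCarryv (PySem.List.pyGetD pvK i 0) (PySem.List.pyGetD w i 0) e f g h]) := rfl

-- Python's x & 0xFFFFFFFF is x mod 2^32, for every int x
lemma pvBandM32 (x : Int) : PySem.Int.band x pvM32 = x % 4294967296 := by
  have hm : ∀ m : Nat, m &&& 4294967295 = m % 4294967296 := fun m => Nat.and_two_pow_sub_one_eq_mod m 32
  by_cases hx : 0 ≤ x
  · simp only [PySem.Int.band, pvM32]
    rw [if_pos hx, if_pos (by norm_num)]
    rw [show (4294967295 : Int).toNat = 4294967295 from rfl, hm x.toNat]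
    omega
  · simp only [PySem.Int.band, pvM32]
    rw [if_neg (by omega), if_pos (by norm_num)]
    rw [show (4294967295 : Int).toNat = 4294967295 from rfl, Nat.and_comm, hm]
    omega

-- the e-reconstruction identity: (a_new - t2 + d) mod 2^32 = (d + t1) & M32
lemma pvE_reconstruct (t1 t2 d : Int) :
    PySem.Int.mod (PySem.Int.band (t1 + t2) pvM32 - t2 + d) ((1:Int) <<< 32)
      = PySem.Int.band (d + t1) pvM32 := by
  rw [show ((1:Int) <<< 32) = 4294967296 from by decide,
      PySem.Int.mod_eq_emod_of_pos (by norm_num), pvBandM32, pvBandM32]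
  omega

-- getD at the appended position
lemma pvGetD_append_self (L : List Int) (x : Int) (i : Int) (h : i = (L.length : Int)) :
    PySem.List.pyGetD (L ++ [x]) i 0 = x := by
  subst h
  rw [PySem.List.pyGetD_eq_getElem (xs := L ++ [x]) (i := (L.length : Int)) (d := 0)
        (by omega) (by simp)]
  simp

-- t2(i) computed by Source B equals pvT2v of the three most recent a-values
lemma pvT2B_eq (L : List Int) (i a b c : Int)
    (h3 : PySem.List.pyGetD L (i+3) 0 = a) (h2 : PySem.List.pyGetD L (i+2) 0 = b)
    (h1 : PySem.List.pyGetD L (i+1) 0 = c) :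
    pvT2B L i = pvT2v a b c := by
  simp only [pvT2B, h3, h2, h1, pvT2v, pvS0v, pvMajv]

-- pvEB is unchanged by appending beyond the indices it reads
lemma pvEB_append (L : List Int) (x : Int) (j : Int) (h : j + 4 < (L.length : Int)) :
    pvEB (L ++ [x]) j = pvEB L j := by
  by_cases hj : j < 0
  · simp [pvEB, hj]
  · rw [not_lt] at hj
    have hpre : L <+: L ++ [x] := List.prefix_append _ _
    simp only [pvEB, if_neg (not_lt.mpr hj), pvT2B]
    rw [pvGetD_of_prefix hpre (j+4) (by omega) (by omega),
        pvGetD_of_prefix hpre (j+3) (by omega) (by omega),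
        pvGetD_of_prefix hpre (j+2) (by omega) (by omega),
        pvGetD_of_prefix hpre (j+1) (by omega) (by omega),
        pvGetD_of_prefix hpre j (by omega) (by omega)]

-- B's reconstructed e at the round just played equals A's new e
lemma pvEB_new (L : List Int) (n : Nat) (kv wv a b c d e f g h : Int)
    (hlen : L.length = n + 4)
    (h3 : PySem.List.pyGetD L ((n:Int)+3) 0 = a) (h2 : PySem.List.pyGetD L ((n:Int)+2) 0 = b)
    (h1 : PySem.List.pyGetD L ((n:Int)+1) 0 = c) (h0 : PySem.List.pyGetD L (n:Int) 0 = d) :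
    pvEB (L ++ [pvNewAv kv wv a b c e f g h]) (n:Int) = pvNewEv kv wv d e f g h := by
  have hpre : L <+: L ++ [pvNewAv kv wv a b c e f g h] := List.prefix_append _ _
  simp only [pvEB, if_neg (by omega : ¬ ((n:Int) < 0))]
  rw [pvGetD_append_self _ _ _ (by omega),
      pvT2B_eq _ _ a b c
        (by rw [pvGetD_of_prefix hpre _ (by omega) (by omega)]; exact h3)
        (by rw [pvGetD_of_prefix hpre _ (by omega) (by omega)]; exact h2)
        (by rw [pvGetD_of_prefix hpre _ (by omega) (by omega)]; exact h1),
      pvGetD_of_prefix hpre (n:Int) (by omega) (by omega), h0,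
      pvNewAv, pvNewEv]
  exact pvE_reconstruct _ _ _

-- one B round, under the correspondence facts
lemma roundB_eq (w L cs : List Int) (n : Nat) (a b c e f g h : Int)
    (h3 : PySem.List.pyGetD L ((n:Int)+3) 0 = a) (h2 : PySem.List.pyGetD L ((n:Int)+2) 0 = b)
    (h1 : PySem.List.pyGetD L ((n:Int)+1) 0 = c)
    (he : pvEB L ((n:Int)-1) = e) (hf : pvEB L ((n:Int)-2) = f)
    (hg : pvEB L ((n:Int)-3) = g) (hh : pvEB L ((n:Int)-4) = h) :
    pvRoundB w (L, cs) (n:Int) =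
      (L ++ [pvNewAv (PySem.List.pyGetD pvK (n:Int) 0) (PySem.List.pyGetD w (n:Int) 0) a b c e f g h],
       cs ++ [pvCarryv (PySem.List.pyGetD pvK (n:Int) 0) (PySem.List.pyGetD w (n:Int) 0) e f g h]) := by
  simp only [pvRoundB, he, hf, hg, hh, pvT2B_eq L (n:Int) a b c h3 h2 h1]
  rfl

-- the round loops in lock-step: B's a-history tracks A's rotating state
lemma pvComp (wA wB : List Int) (N : Nat)
    (hw : ∀ k : Nat, k < N → PySem.List.pyGetD wA (k:Int) 0 = PySem.List.pyGetD wB (k:Int) 0) :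
    ∀ n, n ≤ N → ∃ (a b c d e f g h : Int) (cs L : List Int),
      (List.range n).foldl (fun s (k : Nat) => pvRoundA wA s (k:Int))
          ((0x6a09e667, 0xbb67ae85, 0x3c6ef372, 0xa54ff53a, 0x510e527f, 0x9b05688c, 0x1f83d9ab, 0x5be0cd19), [])
        = ((a, b, c, d, e, f, g, h), cs) ∧
      (List.range n).foldl (fun s (k : Nat) => pvRoundB wB s (k:Int))
          ([0xa54ff53a, 0x3c6ef372, 0xbb67ae85, 0x6a09e667], [])
        = (L, cs) ∧
      L.length = n + 4 ∧
      PySem.List.pyGetD L ((n:Int)+3) 0 = a ∧ PySem.List.pyGetD L ((n:Int)+2) 0 = b ∧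
      PySem.List.pyGetD L ((n:Int)+1) 0 = c ∧ PySem.List.pyGetD L (n:Int) 0 = d ∧
      pvEB L ((n:Int)-1) = e ∧ pvEB L ((n:Int)-2) = f ∧
      pvEB L ((n:Int)-3) = g ∧ pvEB L ((n:Int)-4) = h := by
  intro n
  induction n with
  | zero =>
    intro _
    refine ⟨_, _, _, _, _, _, _, _, _, _, rfl, rfl, rfl, ?_, ?_, ?_, ?_, ?_, ?_, ?_, ?_⟩ <;> decide
  | succ n ih =>
    intro hn
    obtain ⟨a, b, c, d, e, f, g, h, cs, L, hA, hB, hlen, h3, h2, h1, h0, he, hf, hg, hh⟩ := ih (by omega)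
    have hwn := hw n (by omega)
    refine ⟨pvNewAv (PySem.List.pyGetD pvK (n:Int) 0) (PySem.List.pyGetD wA (n:Int) 0) a b c e f g h,
            a, b, c,
            pvNewEv (PySem.List.pyGetD pvK (n:Int) 0) (PySem.List.pyGetD wA (n:Int) 0) d e f g h,
            e, f, g,
            cs ++ [pvCarryv (PySem.List.pyGetD pvK (n:Int) 0) (PySem.List.pyGetD wA (n:Int) 0) e f g h],
            L ++ [pvNewAv (PySem.List.pyGetD pvK (n:Int) 0) (PySem.List.pyGetD wA (n:Int) 0) a b c e f g h],
            ?_, ?_, ?_, ?_, ?_, ?_, ?_, ?_, ?_, ?_, ?_⟩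
    · rw [List.range_succ, List.foldl_append, hA]
      simp only [List.foldl_cons, List.foldl_nil, roundA_eq]
    · rw [List.range_succ, List.foldl_append, hB]
      simp only [List.foldl_cons, List.foldl_nil]
      rw [roundB_eq wB L cs n a b c e f g h h3 h2 h1 he hf hg hh, hwn]
    · simp [hlen]
    · exact pvGetD_append_self _ _ _ (by push_cast; omega)
    · push_cast
      rw [show (n:Int)+1+2 = (n:Int)+3 from by ring,
          pvGetD_of_prefix (List.prefix_append _ _) _ (by omega) (by omega)]; exact h3
    · push_cast
      rw [show (n:Int)+1+1 = (n:Int)+2 from by ring,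
          pvGetD_of_prefix (List.prefix_append _ _) _ (by omega) (by omega)]; exact h2
    · push_cast
      rw [pvGetD_of_prefix (List.prefix_append _ _) _ (by omega) (by omega)]
      exact h1
    · push_cast
      rw [show (n:Int)+1-1 = (n:Int) from by ring]
      exact pvEB_new L n _ _ a b c d e f g h hlen h3 h2 h1 h0
    · push_cast
      rw [show (n:Int)+1-2 = (n:Int)-1 from by ring,
          pvEB_append _ _ _ (by omega)]; exact he
    · push_cast
      rw [show (n:Int)+1-3 = (n:Int)-2 from by ring,
          pvEB_append _ _ _ (by omega)]; exact hf
    · push_cast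
      rw [show (n:Int)+1-4 = (n:Int)-3 from by ring,
          pvEB_append _ _ _ (by omega)]; exact hg

-- ===== VERDICT (by name: the statement is the Claim_ definition above) =====
theorem get_carry_profile_spec : Claim_equal_get_carry_profile := by
  intro W R _ hPre
  obtain ⟨h15, hcov⟩ := hPre
  unfold Spec_get_carry_profile
  simp only [get_carry_profile, get_carry_profile_alt]
  rw [schedA_eq_pvExt, schedB_eq_pvExt]
  set wA := pvExt W (max R 16 - 16).toNat with hwA
  set wB := pvExt W (min R 64 - (W.length : Int)).toNat with hwB
  have hle : (min R 64 - (W.length : Int)).toNat ≤ (max R 16 - 16).toNat := by omega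
  have hw : ∀ k : Nat, k < (min R 64).toNat →
      PySem.List.pyGetD wA (k:Int) 0 = PySem.List.pyGetD wB (k:Int) 0 := by
    intro k hk
    refine pvGetD_of_prefix (pvExt_prefix W _ _ hle) (k:Int) (by omega) ?_
    rw [pvExt_length]; push_cast; omega
  obtain ⟨a, b, c, d, e, f, g, h, cs, L, hA, hB, -⟩ :=
    pvComp wA wB (min R 64).toNat hw (min R 64).toNat (le_refl _)
  rw [PySem.List.pyRange_one,
      show [PySem.List.pyGetD pvIV 3 0, PySem.List.pyGetD pvIV 2 0,
            PySem.List.pyGetD pvIV 1 0, PySem.List.pyGetD pvIV 0 0]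
        = [(0xa54ff53a : Int), 0x3c6ef372, 0xbb67ae85, 0x6a09e667] from by decide]
  simp only [List.foldl_map, Int.sub_zero, Int.zero_add]
  rw [hA, hB]
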